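-- pv_equiv track=rewrite | github.com/DAMG7245-spring2026/final_project | streamlit_cti/pages/01_Health.py | _ordered_deps
-- ===== SOURCE A (Python) =====
-- _DEP_ORDER = ("snowflake", "redis", "s3", "neo4j")
--
-- def _ordered_deps(deps: dict[str, str]) -> list[tuple[str, str]]:
--     seen: set[str] = set()
--     out: list[tuple[str, str]] = []
--     for key in _DEP_ORDER:
--         if key in deps:
--             out.append((key, deps[key]))
--             seen.add(key)
--     for key in sorted(deps.keys()):
--         if key not in seen:
--             out.append((key, deps[key]))
--     return out
-- ===== SOURCE B (Python) =====
-- _DEP_ORDER = ("snowflake", "redis", "s3", "neo4j")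
-- _RANK = {k: i for i, k in enumerate(_DEP_ORDER)}
--
--
-- def _ordered_deps(deps: dict[str, str]) -> list[tuple[str, str]]:
--     return sorted(deps.items(), key=lambda kv: (_RANK.get(kv[0], len(_DEP_ORDER)), kv[0]))
-- ===== Notes on version B (the rewrite author's own statement) =====
-- stated objective: simpler
-- what changed: Replaced A's two loops (a fixed-order scan over _DEP_ORDER plus a sorted-keys pass filtered through a `seen` set) with a single sorted(deps.items()) call keyed by (rank, key), where rank is the key's position in _DEP_ORDER and len(_DEP_ORDER) for all other keys.
import Mathlib
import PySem

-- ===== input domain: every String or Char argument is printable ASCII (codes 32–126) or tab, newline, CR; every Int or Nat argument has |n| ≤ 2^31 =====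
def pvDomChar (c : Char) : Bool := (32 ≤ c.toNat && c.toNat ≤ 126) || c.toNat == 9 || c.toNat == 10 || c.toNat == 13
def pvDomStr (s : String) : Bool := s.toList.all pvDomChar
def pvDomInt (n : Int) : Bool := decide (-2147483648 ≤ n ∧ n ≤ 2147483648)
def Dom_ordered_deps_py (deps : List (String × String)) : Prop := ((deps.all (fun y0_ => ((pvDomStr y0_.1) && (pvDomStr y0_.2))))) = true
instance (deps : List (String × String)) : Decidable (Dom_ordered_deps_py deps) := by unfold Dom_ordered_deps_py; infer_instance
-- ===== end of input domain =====

-- B replaces A's two loops (fixed-order scan + sorted tail filtered through a `seen` set) by ONE keyed sort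
-- of the dict's items under the key (rank, key) — rank = position in _DEP_ORDER, len(_DEP_ORDER) for the rest
-- (objective: simpler — a single sorted() call).

-- ===== PORT A =====
-- _DEP_ORDER = ("snowflake", "redis", "s3", "neo4j")
def pvDepOrder : List String := ["snowflake", "redis", "s3", "neo4j"]

def ordered_deps_py (deps : List (String × String)) : List (String × String) :=
  let d := PySem.Dict.ofList deps
  -- first loop: for key in _DEP_ORDER: if key in deps: out.append(...); seen.add(key)
  -- (deps[key] under the contains guard: ported as getD, exact since the key is present)
  let st := pvDepOrder.foldl
    (fun (p : PySem.Set String × List (String × String)) key =>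
      if d.contains key then (PySem.Set.add p.1 key, p.2 ++ [(key, d.getD key "")]) else p)
    (PySem.Set.empty, [])
  -- second loop: for key in sorted(deps.keys()): if key not in seen: out.append(...)
  (PySem.List.sorted d.keys (fun k => k) false).foldl
    (fun out key => if PySem.Set.contains st.1 key then out else out ++ [(key, d.getD key "")])
    st.2

-- ===== PORT B =====
-- _RANK = {k: i for i, k in enumerate(_DEP_ORDER)}
def pvRank : PySem.Dict String Int :=
  PySem.Dict.ofList ((PySem.List.enumerate pvDepOrder).map (fun p => (p.2, p.1)))

-- return sorted(deps.items(), key=lambda kv: (_RANK.get(kv[0], len(_DEP_ORDER)), kv[0]))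
def ordered_deps_py_alt (deps : List (String × String)) : List (String × String) :=
  PySem.List.sorted2 (PySem.Dict.ofList deps).items
    (fun kv => pvRank.getD kv.1 (PySem.List.len pvDepOrder)) (fun kv => kv.1) false

-- ===== PRECONDITION & SPEC =====
def Spec_ordered_deps_py (deps : List (String × String)) (out : List (String × String)) : Prop := out = ordered_deps_py_alt deps
instance (deps : List (String × String)) (out : List (String × String)) : Decidable (Spec_ordered_deps_py deps out) := by unfold Spec_ordered_deps_py; infer_instance

-- ===== CLAIM (what is proved, stated in full; the proofs are below) =====
def Claim_equal_ordered_deps_py : Prop := ∀ (deps : List (String × String)), Dom_ordered_deps_py deps → Spec_ordered_deps_py deps (ordered_deps_py deps)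

-- ===== LEMMAS AND PROOFS =====

-- Python's tuple key (int, str) compares lexicographically: sorted2 is sorted under the Lex key.
theorem pv_sorted2_eq_sorted_lex (xs : List (String × String))
    (k1 : String × String → Int) (k2 : String × String → String) :
    PySem.List.sorted2 xs k1 k2 false
      = PySem.List.sorted xs (fun x => toLex (k1 x, k2 x)) false := by
  show xs.foldl (fun acc x => PySem.List.insertBy
        (fun a b => decide (k1 a < k1 b) || (!decide (k1 b < k1 a) && decide (k2 a < k2 b))) x acc) []
      = xs.foldl (fun acc x => PySem.List.insertBy
        (fun a b => decide (toLex (k1 a, k2 a) < toLex (k1 b, k2 b))) x acc) []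
  congr 1
  funext acc x
  congr 1
  funext a b
  by_cases h1 : k1 a < k1 b
  · simp [h1, Prod.Lex.toLex_lt_toLex]
  · by_cases h2 : k1 b < k1 a
    · have hne : k1 a ≠ k1 b := by omega
      simp [h1, h2, Prod.Lex.toLex_lt_toLex, hne]
    · have heq : k1 a = k1 b := by omega
      simp [heq, Prod.Lex.toLex_lt_toLex]

-- A's first loop appends the present priority keys and records them in `seen`.
theorem pv_loopA (d : PySem.Dict String String) (ks : List String)
    (s : PySem.Set String) (o : List (String × String)) :
    ks.foldl (fun (p : PySem.Set String × List (String × String)) key =>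
        if d.contains key then (PySem.Set.add p.1 key, p.2 ++ [(key, d.getD key "")]) else p) (s, o)
      = (PySem.Set.update s (ks.filter (fun k => d.contains k)),
         o ++ (ks.filter (fun k => d.contains k)).map (fun k => (k, d.getD k ""))) := by
  induction ks generalizing s o with
  | nil => simp [PySem.Set.update]
  | cons k ks ih => by_cases h : d.contains k <;> simp [h, ih, PySem.Set.update]

-- A's second loop is an append-if fold.
theorem pv_loopB (seen : PySem.Set String) (d : PySem.Dict String String)
    (ks : List String) (o : List (String × String)) :
    ks.foldl (fun out key => if PySem.Set.contains seen key then out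
        else out ++ [(key, d.getD key "")]) o
      = o ++ (ks.filter (fun k => !PySem.Set.contains seen k)).map (fun k => (k, d.getD k "")) := by
  have hfun : (fun (out : List (String × String)) key =>
      if PySem.Set.contains seen key then out else out ++ [(key, d.getD key "")])
      = (fun out key => if (!PySem.Set.contains seen key) = true
          then out ++ [(key, d.getD key "")] else out) := by
    funext o k
    cases h : PySem.Set.contains seen k
    · simp
    · simp
  rw [hfun, PySem.List.foldl_append_if]

-- ranks of the priority keys are strictly increasing along _DEP_ORDER
theorem pv_rank_pairwise :
    pvDepOrder.Pairwise (fun a b =>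
      pvRank.getD a (PySem.List.len pvDepOrder) < pvRank.getD b (PySem.List.len pvDepOrder)) := by
  decide

theorem pv_rank_lt_of_mem (k : String) (hk : k ∈ pvDepOrder) :
    pvRank.getD k (PySem.List.len pvDepOrder) < PySem.List.len pvDepOrder := by
  fin_cases hk <;> decide

theorem pv_rank_of_not_mem (k : String) (hk : k ∉ pvDepOrder) :
    pvRank.getD k (PySem.List.len pvDepOrder) = PySem.List.len pvDepOrder := by
  have hkeys : pvRank.keys = pvDepOrder := by decide
  cases hc : pvRank.contains k with
  | false => exact PySem.Dict.getD_of_not_contains _ _ hc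
  | true =>
    exact absurd (hkeys ▸ (PySem.Dict.contains_iff_mem_keys pvRank k).1 hc) hk

theorem pv_depOrder_nodup : pvDepOrder.Nodup := by decide

-- ===== VERDICT (by name: the statement is the Claim_ definition above) =====
theorem ordered_deps_py_spec : Claim_equal_ordered_deps_py := by
  intro deps _
  show ordered_deps_py deps = ordered_deps_py_alt deps
  have hnk : (PySem.Dict.ofList deps).keys.Nodup := PySem.Dict.nodup_keys_ofList deps
  set d : PySem.Dict String String := PySem.Dict.ofList deps with hd
  set L : Int := PySem.List.len pvDepOrder with hL
  set rk : String → Int := fun k => pvRank.getD k L with hrk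
  set key : String × String → Lex (Int × String) := fun kv => toLex (rk kv.1, kv.1) with hkey
  set f : String → String × String := fun k => (k, d.getD k "") with hf
  set P : List String := pvDepOrder.filter (fun k => d.contains k) with hP
  set SK : List String := PySem.List.sorted d.keys (fun k => k) false with hSK
  set R : List String := SK.filter (fun k => !PySem.Set.contains (PySem.Set.ofList P) k) with hR
  -- A's result in closed form
  have hA : ordered_deps_py deps = P.map f ++ R.map f := by
    simp only [ordered_deps_py]
    rw [← hd]
    rw [pv_loopA d pvDepOrder PySem.Set.empty []]
    rw [pv_loopB _ d _ _]
    simp [PySem.Set.update_nil_left, ← hP, ← hSK, ← hf, PySem.Set.empty]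
    rw [hR]
    congr 1
    apply List.filter_congr
    intro k _
    simp [PySem.Set.mem_ofList]
  -- B's result is the Lex-keyed sort of the items
  have hB : ordered_deps_py_alt deps
      = PySem.List.sorted d.items key false := by
    unfold ordered_deps_py_alt
    rw [← hd, pv_sorted2_eq_sorted_lex]
  rw [hA, hB]
  -- membership facts
  have hmemP : ∀ k, k ∈ P ↔ k ∈ pvDepOrder ∧ k ∈ d.keys := by
    intro k
    simp [hP, List.mem_filter, PySem.Dict.contains_iff_mem_keys]
  have hmemSK : ∀ k, k ∈ SK ↔ k ∈ d.keys := by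
    intro k; simp [hSK, PySem.List.mem_sorted]
  have hmemR : ∀ k, k ∈ R → k ∈ d.keys ∧ k ∉ pvDepOrder := by
    intro k hk
    rw [hR, List.mem_filter] at hk
    obtain ⟨hk1, hk2⟩ := hk
    have hkk : k ∈ d.keys := (hmemSK k).1 hk1
    refine ⟨hkk, fun hmem => ?_⟩
    have : k ∈ P := (hmemP k).2 ⟨hmem, hkk⟩
    simp [PySem.Set.mem_ofList, this] at hk2
  -- the permutation
  have hperm : (P.map f ++ R.map f).Perm d.items := by
    rw [← List.map_append]
    rw [PySem.Dict.items_eq_map_keys d hnk ""]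
    apply List.Perm.map
    -- rewrite R's filter predicate on SK's members
    have hRfilt : R = SK.filter (fun k => decide (k ∉ pvDepOrder)) := by
      rw [hR]
      apply List.filter_congr
      intro k hk
      have hkk : k ∈ d.keys := (hmemSK k).1 hk
      by_cases hmem : k ∈ pvDepOrder
      · simp [PySem.Set.mem_ofList, (hmemP k).2 ⟨hmem, hkk⟩, hmem]
      · have : k ∉ P := fun h => hmem ((hmemP k).1 h).1
        simp [PySem.Set.mem_ofList, this, hmem]
    have hRperm : R.Perm (d.keys.filter (fun k => decide (k ∉ pvDepOrder))) := by
      rw [hRfilt]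
      exact List.Perm.filter _ (PySem.List.sorted_perm d.keys (fun k => k) false)
    have hPperm : P.Perm (d.keys.filter (fun k => decide (k ∈ pvDepOrder))) := by
      rw [List.perm_ext_iff_of_nodup (List.Nodup.filter _ pv_depOrder_nodup)
        (List.Nodup.filter _ hnk)]
      intro k
      simp [List.mem_filter, PySem.Dict.contains_iff_mem_keys, and_comm]
    refine (hPperm.append hRperm).trans ?_
    have := List.filter_append_perm (fun k => decide (k ∈ pvDepOrder)) d.keys
    simpa [decide_not] using this
  -- strict pairwise order under the key
  have hpair : (P.map f ++ R.map f).Pairwise (fun a b => key a < key b) := by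
    rw [List.pairwise_append]
    refine ⟨?_, ?_, ?_⟩
    · -- priority part: ranks strictly increase along _DEP_ORDER
      rw [List.pairwise_map]
      have : P.Pairwise (fun a b => rk a < rk b) :=
        List.Pairwise.sublist (List.filter_sublist) pv_rank_pairwise
      exact this.imp (fun h => (Prod.Lex.toLex_lt_toLex).2 (Or.inl h))
    · -- tail: rank = L everywhere, keys strictly increasing (sorted + nodup)
      rw [List.pairwise_map]
      have hle : R.Pairwise (fun a b => a ≤ b) :=
        List.Pairwise.sublist (List.filter_sublist)
          (PySem.List.sorted_pairwise d.keys (fun k => k))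
      have hnd : R.Nodup :=
        List.Sublist.nodup (List.filter_sublist)
          (((PySem.List.sorted_perm d.keys (fun k => k) false).nodup_iff).2 hnk)
      have hlt : R.Pairwise (fun a b => a < b) :=
        (hle.and hnd).imp (fun h => lt_of_le_of_ne h.1 h.2)
      refine hlt.imp_of_mem (fun {a b} ha hb h => ?_)
      have h4a : rk a = L := pv_rank_of_not_mem a (hmemR a ha).2
      have h4b : rk b = L := pv_rank_of_not_mem b (hmemR b hb).2
      exact (Prod.Lex.toLex_lt_toLex).2 (Or.inr ⟨by rw [h4a, h4b], h⟩)
    · -- every priority entry precedes every tail entry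
      intro x hx y hy
      obtain ⟨a, ha, rfl⟩ := List.mem_map.1 hx
      obtain ⟨b, hb, rfl⟩ := List.mem_map.1 hy
      have haP : a ∈ pvDepOrder := ((hmemP a).1 ha).1
      have h4b : rk b = L := pv_rank_of_not_mem b (hmemR b hb).2
      exact (Prod.Lex.toLex_lt_toLex).2 (Or.inl (by rw [h4b]; exact pv_rank_lt_of_mem a haP))
  exact (PySem.List.sorted_eq_of_perm_of_pairwise_lt d.items (P.map f ++ R.map f) key hperm hpair).symm
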